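-- pv_equiv track=rewrite | github.com/jsrdhara/Datastructures | Anagram.py | anagramSolution1
-- ===== SOURCE A (Python) =====
-- def anagramSolution1(s1,s2):
--
--     list_2 = list(s2)
--     i = 0
--     stillOK = True
--     while i < len(s1) and stillOK:
--         j = 0
--         found = False
--         while j < len(list_2) and not found:
--             if s1[i] == list_2[j]:
--                 found = True
--             else:
--                 j = j + 1
--         if found:
--             list_2[j] = None
--         else:
--             stillOK = False
--         i = i + 1
--     return stillOK
-- ===== SOURCE B (Python) =====
-- def anagramSolution1(s1, s2):
--     counts = {}
--     for c in s2:
--         counts[c] = counts.get(c, 0) + 1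
--     for c in s1:
--         if counts.get(c, 0) == 0:
--             return False
--         counts[c] = counts[c] - 1
--     return True
-- ===== Notes on version B (the rewrite author's own statement) =====
-- stated objective: faster
-- what changed: Replaced the nested scan-and-mark over a mutable copy of s2 by a single-pass character counter (dict) built from s2 and decremented while walking s1.
import Mathlib
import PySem

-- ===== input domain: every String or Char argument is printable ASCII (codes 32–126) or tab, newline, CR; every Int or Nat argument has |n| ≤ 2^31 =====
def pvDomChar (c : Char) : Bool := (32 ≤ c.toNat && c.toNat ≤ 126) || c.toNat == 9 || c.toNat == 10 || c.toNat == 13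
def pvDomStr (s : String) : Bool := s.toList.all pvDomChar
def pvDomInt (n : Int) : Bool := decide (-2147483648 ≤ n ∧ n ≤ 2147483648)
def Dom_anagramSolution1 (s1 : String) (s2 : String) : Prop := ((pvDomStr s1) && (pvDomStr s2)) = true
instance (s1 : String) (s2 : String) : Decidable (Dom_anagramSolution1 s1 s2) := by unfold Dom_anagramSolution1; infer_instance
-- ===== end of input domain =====

-- B replaces A's quadratic scan-and-mark over a copy of s2 by a linear dict counter (objective: faster).

-- ===== PORT A =====
-- inner while: scan list_2 for the first slot equal to `some c`; on a hit set it to none (Python's list_2[j] = None)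
def pvFindMark : Char → List (Option Char) → Option (List (Option Char))
  | _, [] => none
  | c, x :: xs => if x == some c then some (none :: xs)
                  else (pvFindMark c xs).map (x :: ·)

-- outer while over s1's characters; stillOK = False exits the loop immediately
def pvOuter : List Char → List (Option Char) → Bool
  | [], _ => true
  | c :: cs, l =>
    match pvFindMark c l with
    | some l' => pvOuter cs l'
    | none => false

def anagramSolution1 (s1 : String) (s2 : String) : Bool :=
  pvOuter s1.toList (s2.toList.map some)

-- ===== PORT B =====
-- second loop of Source B: look up the count, fail on 0, else decrement
def pvConsume : List Char → PySem.Dict Char Int → Bool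
  | [], _ => true
  | c :: cs, d =>
    if d.getD c 0 == 0 then false
    else pvConsume cs (d.insert c (d.getD c 0 - 1))

def anagramSolution1_alt (s1 : String) (s2 : String) : Bool :=
  -- first loop of Source B: counts[c] = counts.get(c, 0) + 1
  let counts := s2.toList.foldl (fun d c => d.insert c (d.getD c 0 + 1)) PySem.Dict.empty
  pvConsume s1.toList counts

-- ===== PRECONDITION & SPEC =====
def Spec_anagramSolution1 (s1 : String) (s2 : String) (out : Bool) : Prop := out = anagramSolution1_alt s1 s2
instance (s1 : String) (s2 : String) (out : Bool) : Decidable (Spec_anagramSolution1 s1 s2 out) := by unfold Spec_anagramSolution1; infer_instance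

-- ===== CLAIM (what is proved, stated in full; the proofs are below) =====
def Claim_equal_anagramSolution1 : Prop := ∀ (s1 : String) (s2 : String), Dom_anagramSolution1 s1 s2 → Spec_anagramSolution1 s1 s2 (anagramSolution1 s1 s2)

-- ===== LEMMAS AND PROOFS =====

-- the live (unmarked) characters of A's working list
def pvLive (l : List (Option Char)) : List Char := l.filterMap id

theorem pvFindMark_none {c : Char} {l : List (Option Char)}
    (h : pvFindMark c l = none) : (pvLive l).count c = 0 := by
  induction l with
  | nil => simp [pvLive]
  | cons x xs ih =>
    simp only [pvFindMark] at h
    split at h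
    · simp at h
    · rename_i hx
      simp only [Option.map_eq_none_iff] at h
      cases x with
      | none => simpa [pvLive] using ih h
      | some a =>
        have : a ≠ c := by simpa using hx
        simpa [pvLive, List.count_cons, this] using ih h

theorem pvFindMark_some_pos' {c : Char} {l l' : List (Option Char)}
    (h : pvFindMark c l = some l') : 1 ≤ (pvLive l).count c := by
  induction l generalizing l' with
  | nil => simp [pvFindMark] at h
  | cons y ys ih =>
    simp only [pvFindMark] at h
    split at h
    · rename_i hy
      have hy' : y = some c := by simpa using hy
      subst hy'
      simp [pvLive]
    · rename_i hy
      obtain ⟨m, hm, rfl⟩ := Option.map_eq_some_iff.mp h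
      cases y with
      | none => simpa [pvLive] using ih hm
      | some a =>
        have := ih hm
        simp only [pvLive, List.filterMap_cons, id] at this ⊢
        simp [List.count_cons]
        omega

theorem pvFindMark_some {c : Char} {l l' : List (Option Char)}
    (h : pvFindMark c l = some l') :
    ∀ x, (pvLive l').count x = (pvLive l).count x - (if x = c then 1 else 0) := by
  induction l generalizing l' with
  | nil => simp [pvFindMark] at h
  | cons y ys ih =>
    simp only [pvFindMark] at h
    split at h
    · rename_i hy
      have hy' : y = some c := by simpa using hy
      obtain rfl : l' = none :: ys := by simpa using h.symm
      intro x
      subst hy'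
      by_cases hx : x = c
      · subst hx; simp [pvLive]
      · simp [pvLive, hx, Ne.symm hx]
    · rename_i hy
      obtain ⟨m, hm, rfl⟩ := Option.map_eq_some_iff.mp h
      intro x
      cases y with
      | none => simpa [pvLive] using ih hm x
      | some a =>
        have hcnt := ih hm x
        have hpos := pvFindMark_some_pos' hm
        by_cases hx : x = c
        · subst hx
          have ha : a ≠ x := by intro e; exact hy (by simp [e])
          simp only [pvLive, List.filterMap_cons, id] at hcnt hpos ⊢
          simp only [if_true] at hcnt ⊢
          simp only [List.count_cons, hcnt]
          omega
        · simp only [pvLive, List.filterMap_cons, id] at hcnt ⊢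
          by_cases hax : a = x
          · subst hax
            simp [hcnt, hx]
          · simp [hax, hcnt]

-- the two loops agree whenever the dict counts exactly the live characters
theorem pvOuter_eq_consume :
    ∀ (cs : List Char) (l : List (Option Char)) (d : PySem.Dict Char Int),
      (∀ c, d.getD c 0 = ((pvLive l).count c : Int)) →
      pvOuter cs l = pvConsume cs d := by
  intro cs
  induction cs with
  | nil => intro l d _; rfl
  | cons c cs ih =>
    intro l d hinv
    simp only [pvOuter, pvConsume]
    cases h : pvFindMark c l with
    | none =>
      have h0 := pvFindMark_none h
      have : d.getD c 0 = 0 := by rw [hinv c, h0]; rfl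
      simp [this]
    | some l' =>
      have hpos := pvFindMark_some_pos' h
      have hne : ¬ (d.getD c 0 == 0) = true := by
        rw [hinv c]; simp; omega
      simp only [hne]
      apply ih
      intro x
      have hc := pvFindMark_some h x
      rw [PySem.Dict.getD_insert]
      by_cases hx : x = c
      · subst hx
        rw [if_pos rfl, hinv x, hc]
        simp
        omega
      · rw [if_neg hx, hinv x, hc]
        simp [hx]

theorem pvLive_map_some (xs : List Char) : pvLive (xs.map some) = xs := by
  simp [pvLive]

-- ===== VERDICT (by name: the statement is the Claim_ definition above) =====
theorem anagramSolution1_spec : Claim_equal_anagramSolution1 := by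
  intro s1 s2 _
  unfold Spec_anagramSolution1 anagramSolution1 anagramSolution1_alt
  apply pvOuter_eq_consume
  intro c
  rw [PySem.Dict.getD_foldl_insert_add_one, pvLive_map_some,
    show PySem.Dict.empty.getD c (0:Int) = 0 from rfl]
  ring
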